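-- pv_equiv track=rewrite | github.com/Awiomanik/Advent_of_Code_2023 | Solutions/2023/Day03/EVENT.py | list_numbers_coords
-- ===== SOURCE A (Python) =====
-- data = []
--
-- def list_numbers_coords(data):
--     '''Iterate over data array and return list of tuples with numbers and their coordinates [(nuum, (row, col), ), ]'''
--     num_coords = []
--     temp_coords = []
--     temp_number = ''
--
--     for i, row in enumerate(data):
--         for j, col in enumerate(row):
--             if col.isdigit():
--                 temp_coords.append((i, j))
--                 temp_number += col
--             else:
--                 if temp_coords:
--                     num_coords.append((int(temp_number), temp_coords))
--                     temp_coords = []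
--                     temp_number = ''
--         if temp_coords:
--             num_coords.append((int(temp_number), temp_coords))
--             temp_coords = []
--             temp_number = ''
--     if temp_coords:
--         num_coords.append((int(temp_number), temp_coords))
--         temp_coords = []
--         temp_number = ''
--
--     return num_coords
-- ===== SOURCE B (Python) =====
-- def list_numbers_coords(data):
--     '''Iterate over data array and return list of tuples with numbers and their coordinates [(nuum, (row, col), ), ]'''
--     out = []
--     for i, row in enumerate(data):
--         j, n = 0, len(row)
--         while j < n:
--             if row[j].isdigit():
--                 k = j
--                 while k < n and row[k].isdigit():
--                     k += 1
--                 out.append((int(row[j:k]), [(i, c) for c in range(j, k)]))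
--                 j = k
--             else:
--                 j += 1
--     return out
-- ===== Notes on version B (the rewrite author's own statement) =====
-- stated objective: alternative
-- what changed: Replaces A's char-by-char accumulator with flush-on-delimiter (pending coordinate list and digit string, flushed at non-digits, row ends and the final end) by a two-pointer run scanner per row that jumps to the end of each digit run, slices the number out and builds its coordinate list in one step.
import Mathlib
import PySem

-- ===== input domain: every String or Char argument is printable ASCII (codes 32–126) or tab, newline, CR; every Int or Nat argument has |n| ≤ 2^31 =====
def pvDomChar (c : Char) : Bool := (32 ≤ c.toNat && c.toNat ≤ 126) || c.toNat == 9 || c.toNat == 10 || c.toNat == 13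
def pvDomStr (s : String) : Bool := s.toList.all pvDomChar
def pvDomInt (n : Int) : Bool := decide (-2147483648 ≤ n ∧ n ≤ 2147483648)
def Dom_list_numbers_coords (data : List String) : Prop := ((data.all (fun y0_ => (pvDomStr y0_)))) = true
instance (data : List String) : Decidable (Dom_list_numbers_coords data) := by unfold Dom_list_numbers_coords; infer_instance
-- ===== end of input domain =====

-- B replaces A's char-by-char flush-on-delimiter accumulator with a per-row two-pointer
-- digit-run scanner (jump to the run's end, slice the number, build its coords in one step);
-- same cost, different decomposition.


-- int(temp_number): the argument is always a nonempty run of digits here, so ofChars? is `some`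
def pvInt (cs : List Char) : Int := (PySem.Int.ofChars? cs).getD 0

-- ===== PORT A =====
-- state = (num_coords, temp_coords, temp_number); inner `for j, col in enumerate(row)` as
-- recursion carrying j
def aLoop (i : Int) (j : Int) (st : List (Int × List (Int × Int)) × List (Int × Int) × List Char) :
    List Char → List (Int × List (Int × Int)) × List (Int × Int) × List Char
  | [] => st
  | c :: rest =>
    aLoop i (j + 1)
      (if PySem.Chars.isdigit c then (st.1, st.2.1 ++ [(i, j)], st.2.2 ++ [c])
       else if st.2.1 ≠ [] then (st.1 ++ [(pvInt st.2.2, st.2.1)], [], []) else st) rest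

-- `if temp_coords: num_coords.append(...); temp_coords = []; temp_number = ''`
def aFlush (st : List (Int × List (Int × Int)) × List (Int × Int) × List Char) :
    List (Int × List (Int × Int)) × List (Int × Int) × List Char :=
  if st.2.1 ≠ [] then (st.1 ++ [(pvInt st.2.2, st.2.1)], [], []) else st

-- outer `for i, row in enumerate(data)` as recursion carrying i
def aRows (i : Int) (st : List (Int × List (Int × Int)) × List (Int × Int) × List Char) :
    List String → List (Int × List (Int × Int)) × List (Int × Int) × List Char
  | [] => st
  | row :: rest => aRows (i + 1) (aFlush (aLoop i 0 st row.toList)) rest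

def list_numbers_coords (data : List String) : List (Int × (List (Int × Int))) :=
  (aFlush (aRows 0 ([], [], []) data)).1

-- ===== PORT B =====
-- inner while-loop: on a digit, take the whole run (k scans forward), emit number + coords, jump to k
def bRow (i : Int) (j : Int) : List Char → List (Int × List (Int × Int))
  | [] => []
  | c :: rest =>
    if PySem.Chars.isdigit c then
      (pvInt (c :: rest.takeWhile PySem.Chars.isdigit),
        (List.range (c :: rest.takeWhile PySem.Chars.isdigit).length).map (fun d : Nat => (i, j + (d : Int)))) ::
        bRow i (j + ((c :: rest.takeWhile PySem.Chars.isdigit).length : Int))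
          (rest.dropWhile PySem.Chars.isdigit)
    else
      bRow i (j + 1) rest
  termination_by cs => cs.length
  decreasing_by
  · simpa using Nat.lt_succ_of_le (List.length_dropWhile_le _ rest)
  · simp

def bRows (i : Int) : List String → List (Int × List (Int × Int))
  | [] => []
  | row :: rest => bRow i 0 row.toList ++ bRows (i + 1) rest

def list_numbers_coords_alt (data : List String) : List (Int × (List (Int × Int))) :=
  bRows 0 data

-- ===== PRECONDITION & SPEC =====
def Spec_list_numbers_coords (data : List String) (out : List (Int × (List (Int × Int)))) : Prop := out = list_numbers_coords_alt data
instance (data : List String) (out : List (Int × (List (Int × Int)))) : Decidable (Spec_list_numbers_coords data out) := by unfold Spec_list_numbers_coords; infer_instance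

-- ===== CLAIM (what is proved, stated in full; the proofs are below) =====
def Claim_equal_list_numbers_coords : Prop := ∀ (data : List String), Dom_list_numbers_coords data → Spec_list_numbers_coords data (list_numbers_coords data)

-- ===== LEMMAS AND PROOFS =====

-- B's row scan, generalized with a pending run (tc = its coords so far, cn = its digits so far)
def bRowP (i : Int) (j : Int) (tc : List (Int × Int)) (cn : List Char) :
    List Char → List (Int × List (Int × Int))
  | [] => if tc = [] then [] else [(pvInt cn, tc)]
  | c :: rest =>
    if PySem.Chars.isdigit c then bRowP i (j + 1) (tc ++ [(i, j)]) (cn ++ [c]) rest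
    else (if tc = [] then [] else [(pvInt cn, tc)]) ++ bRowP i (j + 1) [] [] rest


theorem coords_shift (i j : Int) (n : Nat) :
    (List.range (n + 1)).map (fun d : Nat => (i, j + (d : Int))) =
      (i, j) :: (List.range n).map (fun d : Nat => (i, (j + 1) + (d : Int))) := by
  rw [List.range_succ_eq_map, List.map_cons, List.map_map]
  congr 1
  · simp
  · refine List.map_congr_left ?_
    intro d _
    have h : ((Nat.succ d : Nat) : Int) = (d : Int) + 1 := by push_cast; ring
    simp [Function.comp, h]
    ring

theorem bRowP_pending (i : Int) :
    ∀ (cs : List Char) (j : Int) (tc : List (Int × Int)) (cn : List Char), tc ≠ [] →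
    bRowP i j tc cn cs =
      (pvInt (cn ++ cs.takeWhile PySem.Chars.isdigit),
        tc ++ (List.range (cs.takeWhile PySem.Chars.isdigit).length).map (fun d : Nat => (i, j + (d : Int)))) ::
        bRowP i (j + ((cs.takeWhile PySem.Chars.isdigit).length : Int)) [] []
          (cs.dropWhile PySem.Chars.isdigit) := by
  intro cs
  induction cs with
  | nil => intro j tc cn h; simp [bRowP, h]
  | cons c rest ih =>
    intro j tc cn h
    by_cases hd : PySem.Chars.isdigit c
    · have h' : tc ++ [(i, j)] ≠ [] := by simp
      simp only [bRowP, hd, if_pos, List.takeWhile_cons_of_pos hd, List.dropWhile_cons_of_pos hd]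
      rw [ih (j + 1) _ _ h']
      rw [List.length_cons, coords_shift]
      have harith : j + (((rest.takeWhile PySem.Chars.isdigit).length + 1 : Nat) : Int) =
          j + 1 + ((rest.takeWhile PySem.Chars.isdigit).length : Int) := by push_cast; ring
      rw [harith]
      simp [List.append_assoc]
    · simp only [bRowP, hd, Bool.false_eq_true, if_false,
        List.takeWhile_cons_of_neg hd, List.dropWhile_cons_of_neg hd]
      simp [h]

theorem bRowP_eq_bRow (i : Int) :
    ∀ (n : Nat) (cs : List Char), cs.length ≤ n → ∀ (j : Int),
      bRowP i j [] [] cs = bRow i j cs := by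
  intro n
  induction n with
  | zero => intro cs hcs j; simp at hcs; subst hcs; simp [bRowP, bRow]
  | succ n ih =>
    intro cs hcs j
    match cs with
    | [] => simp [bRowP, bRow]
    | c :: rest =>
      by_cases hd : PySem.Chars.isdigit c
      · simp only [bRowP, hd, if_pos, List.nil_append]
        rw [bRowP_pending i rest (j + 1) [(i, j)] [c] (by simp)]
        rw [ih _ (le_trans (List.length_dropWhile_le _ rest) (by simpa using hcs))]
        simp only [bRow, hd, if_pos]
        rw [List.length_cons, coords_shift]
        have harith : j + (((rest.takeWhile PySem.Chars.isdigit).length + 1 : Nat) : Int) =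
            j + 1 + ((rest.takeWhile PySem.Chars.isdigit).length : Int) := by push_cast; ring
        rw [harith]
        simp
      · simp only [bRowP, bRow, hd, Bool.false_eq_true, if_false, List.nil_append]
        exact ih rest (by simpa using Nat.le_of_succ_le_succ hcs) (j + 1)

theorem aLoop_flush (i : Int) :
    ∀ (cs : List Char) (j : Int) (acc : List (Int × List (Int × Int)))
      (tc : List (Int × Int)) (cn : List Char), (tc = [] → cn = []) →
      aFlush (aLoop i j (acc, tc, cn) cs) = (acc ++ bRowP i j tc cn cs, [], []) := by
  intro cs
  induction cs with
  | nil =>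
    intro j acc tc cn h
    by_cases htc : tc = []
    · subst htc; simp [aLoop, aFlush, bRowP, h rfl]
    · simp [aLoop, aFlush, bRowP, htc]
  | cons c rest ih =>
    intro j acc tc cn h
    by_cases hd : PySem.Chars.isdigit c
    · simp only [aLoop, hd, if_pos]
      rw [ih (j + 1) acc (tc ++ [(i, j)]) (cn ++ [c]) (by simp)]
      simp [bRowP, hd]
    · by_cases htc : tc = []
      · subst htc
        simp only [aLoop, hd, Bool.false_eq_true, if_false, ne_eq, not_true_eq_false]
        rw [h rfl]
        rw [ih (j + 1) acc [] [] (fun _ => rfl)]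
        simp [bRowP, hd]
      · simp only [aLoop, hd, Bool.false_eq_true, if_false, if_pos (by simpa using htc)]
        rw [ih (j + 1) (acc ++ [(pvInt cn, tc)]) [] [] (fun _ => rfl)]
        simp [bRowP, hd, htc, List.append_assoc]

theorem aRows_eq_bRows :
    ∀ (rows : List String) (i : Int) (acc : List (Int × List (Int × Int))),
      aRows i (acc, [], []) rows = (acc ++ bRows i rows, [], []) := by
  intro rows
  induction rows with
  | nil => intro i acc; simp [aRows, bRows]
  | cons row rest ih =>
    intro i acc
    simp only [aRows, bRows]
    rw [aLoop_flush i row.toList 0 acc [] [] (fun _ => rfl),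
      bRowP_eq_bRow i row.toList.length row.toList le_rfl 0, ih]
    simp [List.append_assoc]

-- ===== VERDICT (by name: the statement is the Claim_ definition above) =====
theorem list_numbers_coords_spec : Claim_equal_list_numbers_coords := by
  intro data _
  unfold Spec_list_numbers_coords list_numbers_coords list_numbers_coords_alt
  rw [aRows_eq_bRows data 0 []]
  simp [aFlush]
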